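-- pv_equiv track=rewrite | github.com/hyemin21/PPS | 2024_summer/week3/A032_신혜민_20240722.py | president
-- ===== SOURCE A (Python) =====
-- def president(k: int, n: int) -> int:
--     dp = [[0] * (n + 1) for _ in range(k + 1)]
--     for i in range(1, n + 1):
--         dp[0][i] = i
--     for i in range(1, k + 1):
--         for j in range(1, n + 1):
--             dp[i][j] = dp[i][j-1] + dp[i-1][j]
--     return dp[k][n]
-- ===== SOURCE B (Python) =====
-- def president(k: int, n: int) -> int:
--     # dp[k][n] = C(n+k, k+1): compute the binomial coefficient directly in O(k)
--     num = 1
--     for i in range(1, k + 2):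
--         num = num * (n - 1 + i) // i
--     return num
-- ===== Notes on version B (the rewrite author's own statement) =====
-- stated objective: faster
-- what changed: Replaced the O(k*n) Pascal-style DP table with the closed form dp[k][n] = C(n+k, k+1), computed by the O(k) multiplicative binomial-coefficient loop.
import Mathlib
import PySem

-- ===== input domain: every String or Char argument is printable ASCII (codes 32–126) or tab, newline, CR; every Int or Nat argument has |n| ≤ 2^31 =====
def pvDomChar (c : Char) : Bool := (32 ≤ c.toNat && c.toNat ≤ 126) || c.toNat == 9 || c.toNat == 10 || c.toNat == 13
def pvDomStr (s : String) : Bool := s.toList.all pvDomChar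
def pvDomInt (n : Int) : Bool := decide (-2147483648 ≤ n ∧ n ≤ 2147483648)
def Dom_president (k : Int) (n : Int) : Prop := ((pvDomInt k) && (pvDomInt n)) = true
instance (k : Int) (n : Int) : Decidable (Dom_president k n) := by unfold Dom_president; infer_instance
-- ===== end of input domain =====

-- B replaces A's O(k*n) Pascal-style DP table by the closed form dp[k][n] = C(n+k, k+1),
-- computed with the O(k) multiplicative binomial-coefficient loop (objective: faster).

-- ===== PORT A =====
-- dp[i][j] read and write; under Pre_ every index these are applied to is nonnegative and
-- in range, so the defaults of pyGetD/pySetD are never hit where Python would raise.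
def pvGet2 (dp : List (List Int)) (i j : Int) : Int :=
  PySem.List.pyGetD (PySem.List.pyGetD dp i []) j 0

def pvSet2 (dp : List (List Int)) (i j : Int) (v : Int) : List (List Int) :=
  PySem.List.pySetD dp i (PySem.List.pySetD (PySem.List.pyGetD dp i []) j v)

def president (k : Int) (n : Int) : Int :=
  -- dp = [[0] * (n + 1) for _ in range(k + 1)]
  let dp0 : List (List Int) :=
    (PySem.List.pyRange 0 (k + 1) 1).map (fun _ => List.replicate (n + 1).toNat 0)
  -- for i in range(1, n + 1): dp[0][i] = i
  let dp1 : List (List Int) :=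
    (PySem.List.pyRange 1 (n + 1) 1).foldl (fun dp i => pvSet2 dp 0 i i) dp0
  -- for i in range(1, k + 1): for j in range(1, n + 1): dp[i][j] = dp[i][j-1] + dp[i-1][j]
  let dp2 : List (List Int) :=
    (PySem.List.pyRange 1 (k + 1) 1).foldl (fun dp i =>
      (PySem.List.pyRange 1 (n + 1) 1).foldl (fun dp j =>
        pvSet2 dp i j (pvGet2 dp i (j - 1) + pvGet2 dp (i - 1) j)) dp) dp1
  -- return dp[k][n]
  pvGet2 dp2 k n

-- ===== PORT B =====
def president_alt (k : Int) (n : Int) : Int :=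
  -- num = 1; for i in range(1, k + 2): num = num * (n - 1 + i) // i; return num
  (PySem.List.pyRange 1 (k + 2) 1).foldl
    (fun num i => PySem.Int.floordiv (num * (n - 1 + i)) i) 1

-- ===== PRECONDITION & SPEC =====
-- Pre_ excludes exactly the inputs with k < 0 or n < 0, on which A raises IndexError
-- (an empty table or an empty row is indexed); A returns normally on every other input.
def Pre_president (k : Int) (n : Int) : Prop := 0 ≤ k ∧ 0 ≤ n
instance (k : Int) (n : Int) : Decidable (Pre_president k n) := by unfold Pre_president; infer_instance

def pvWitness_president : Int × Int := (2, 3)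

def Spec_president (k : Int) (n : Int) (out : Int) : Prop := out = president_alt k n
instance (k : Int) (n : Int) (out : Int) : Decidable (Spec_president k n out) := by unfold Spec_president; infer_instance

-- ===== CLAIM (what is proved, stated in full; the proofs are below) =====
def Claim_equal_president : Prop := ∀ (k : Int) (n : Int), Dom_president k n → Pre_president k n → Spec_president k n (president k n)

-- ===== LEMMAS AND PROOFS =====

-- The common value: pvR i s = C(i+s, i+1), the entry dp[i][s] of A's table.
def pvR (i s : Nat) : Int := (Nat.choose (i + s) (i + 1) : Int)

def pvG (dp : List (List Int)) (i j : Nat) : Int := (dp.getD i []).getD j 0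

lemma pvGet2_natCast (dp : List (List Int)) (i j : Nat) :
    pvGet2 dp (i : Int) (j : Int) = pvG dp i j := by
  simp [pvGet2, pvG, pysem]

lemma pvSet2_natCast (dp : List (List Int)) (i j : Nat) (v : Int) :
    pvSet2 dp (i : Int) (j : Int) v = dp.set i ((dp.getD i []).set j v) := by
  simp [pvSet2, pysem]

lemma row_set2_self (dp : List (List Int)) (i j : Nat) (v : Int) :
    ((dp.set i ((dp.getD i []).set j v)).getD i []) = (dp.getD i []).set j v := by
  by_cases h : i < dp.length
  · rw [List.getD_eq_getElem?_getD, List.getElem?_set_self (by simpa using h)]; rfl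
  · rw [List.set_eq_of_length_le (by omega), List.getD_eq_getElem?_getD,
      List.getElem?_eq_none (by omega)]
    simp

lemma row_set2_ne (dp : List (List Int)) (i j r : Nat) (v : Int) (h : r ≠ i) :
    ((dp.set i ((dp.getD i []).set j v)).getD r []) = dp.getD r [] := by
  rw [List.getD_eq_getElem?_getD, List.getElem?_set_ne (by omega), ← List.getD_eq_getElem?_getD]

lemma pvG_set2_ne_row (dp : List (List Int)) (i j r s : Nat) (v : Int) (h : r ≠ i) :
    pvG (dp.set i ((dp.getD i []).set j v)) r s = pvG dp r s := by
  unfold pvG; rw [row_set2_ne _ _ _ _ _ h]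

lemma pvG_set2_self (dp : List (List Int)) (i j : Nat) (v : Int)
    (hj : j < (dp.getD i []).length) :
    pvG (dp.set i ((dp.getD i []).set j v)) i j = v := by
  unfold pvG
  rw [row_set2_self, List.getD_eq_getElem?_getD, List.getElem?_set_self (by simpa using hj)]
  rfl

lemma pvG_set2_ne_col (dp : List (List Int)) (i j s : Nat) (v : Int) (h : s ≠ j) :
    pvG (dp.set i ((dp.getD i []).set j v)) i s = pvG dp i s := by
  unfold pvG
  rw [row_set2_self, List.getD_eq_getElem?_getD, List.getElem?_set_ne (by omega),
    ← List.getD_eq_getElem?_getD]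



lemma pvR_zero_col (i : Nat) : pvR i 0 = 0 := by
  simp [pvR]

lemma pvR_pascal (i m : Nat) (hi : 1 ≤ i) :
    pvR i m + pvR (i - 1) (m + 1) = pvR i (m + 1) := by
  obtain ⟨i', rfl⟩ : ∃ i', i = i' + 1 := ⟨i - 1, by omega⟩
  unfold pvR
  have h : Nat.choose (i' + 1 + (m + 1)) (i' + 1 + 1)
      = Nat.choose (i' + 1 + m) (i' + 1) + Nat.choose (i' + 1 + m) (i' + 1 + 1) := by
    have := Nat.choose_succ_succ (i' + 1 + m) (i' + 1)
    have e : i' + 1 + m + 1 = i' + 1 + (m + 1) := by omega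
    rw [← e]; omega
  have e2 : i' + 1 - 1 + (m + 1) = i' + 1 + m := by omega
  have e3 : i' + 1 - 1 + 1 = i' + 1 := by omega
  rw [e2, e3, h]
  push_cast; ring

lemma inner_fold (K N i : Nat) (hi1 : 1 ≤ i) (hiK : i ≤ K) (dp : List (List Int))
    (hlen : dp.length = K + 1) (hrow : ∀ r, r < K + 1 → (dp.getD r []).length = N + 1)
    (hprev : ∀ s, s ≤ N → pvG dp (i - 1) s = pvR (i - 1) s)
    (hcur : ∀ s, pvG dp i s = 0) :
    ∀ m, m ≤ N →
      ((PySem.List.pyRange 1 ((m : Int) + 1) 1).foldl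
          (fun dp j => pvSet2 dp (i : Int) j (pvGet2 dp (i : Int) (j - 1) + pvGet2 dp ((i : Int) - 1) j)) dp
        |> fun dp' =>
        dp'.length = K + 1 ∧ (∀ r, r < K + 1 → (dp'.getD r []).length = N + 1) ∧
        (∀ r, r ≠ i → ∀ s, pvG dp' r s = pvG dp r s) ∧
        (∀ s, s ≤ m → pvG dp' i s = pvR i s) ∧
        (∀ s, m < s → pvG dp' i s = 0)) := by
  intro m
  induction m with
  | zero =>
      intro _
      rw [show ((0:Nat):Int) + 1 = 1 by norm_num, PySem.List.pyRange_one_eq_nil (by omega)]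
      simp only [List.foldl_nil]
      refine ⟨hlen, hrow, by simp, ?_, fun s _ => hcur s⟩
      intro s hs
      interval_cases s
      rw [pvR_zero_col]; exact hcur 0
  | succ m ih =>
      intro hm
      obtain ⟨l1, l2, l3, l4, l5⟩ := ih (by omega)
      rw [show ((m+1:Nat):Int) + 1 = ((m:Int)+1) + 1 by push_cast; ring,
        PySem.List.pyRange_one_succ_right (by omega),
        List.foldl_append, List.foldl_cons, List.foldl_nil]
      set dp' := (PySem.List.pyRange 1 ((m : Int) + 1) 1).foldl
          (fun dp j => pvSet2 dp (i : Int) j (pvGet2 dp (i : Int) (j - 1) + pvGet2 dp ((i : Int) - 1) j)) dp with hdp'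
      have ecast1 : ((m : Int) + 1) = ((m + 1 : Nat) : Int) := by push_cast; ring
      have ecast2 : ((m : Int) + 1 - 1) = ((m : Nat) : Int) := by omega
      have ecast3 : ((i : Int) - 1) = ((i - 1 : Nat) : Int) := by omega
      rw [ecast2, ecast3, ecast1, pvGet2_natCast, pvGet2_natCast, pvSet2_natCast]
      have hval : pvG dp' i m + pvG dp' (i - 1) (m + 1) = pvR i (m + 1) := by
        rw [l4 m (by omega), l3 (i - 1) (by omega) (m + 1), hprev (m + 1) (by omega)]
        exact pvR_pascal i m hi1
      rw [hval]
      have hrowlen : (dp'.getD i []).length = N + 1 := l2 i (by omega)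
      refine ⟨by simpa using l1, ?_, ?_, ?_, ?_⟩
      · intro r hr
        by_cases h : r = i
        · subst h; rw [row_set2_self]; simpa using hrowlen
        · rw [row_set2_ne _ _ _ _ _ h]; exact l2 r hr
      · intro r hr s
        rw [pvG_set2_ne_row _ _ _ _ _ _ hr]; exact l3 r hr s
      · intro s hs
        by_cases h : s = m + 1
        · subst h; exact pvG_set2_self _ _ _ _ (by omega)
        · rw [pvG_set2_ne_col _ _ _ _ _ h]; exact l4 s (by omega)
      · intro s hs
        rw [pvG_set2_ne_col _ _ _ _ _ (by omega)]; exact l5 s (by omega)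

lemma outer_fold (K N : Nat) (dp : List (List Int))
    (hlen : dp.length = K + 1) (hrow : ∀ r, r < K + 1 → (dp.getD r []).length = N + 1)
    (h0 : ∀ s, s ≤ N → pvG dp 0 s = pvR 0 s)
    (hz : ∀ r, 1 ≤ r → ∀ s, pvG dp r s = 0) :
    ∀ t, t ≤ K →
      ((PySem.List.pyRange 1 ((t : Int) + 1) 1).foldl (fun dp i =>
          (PySem.List.pyRange 1 ((N : Int) + 1) 1).foldl
            (fun dp j => pvSet2 dp i j (pvGet2 dp i (j - 1) + pvGet2 dp (i - 1) j)) dp) dp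
        |> fun dp' =>
        dp'.length = K + 1 ∧ (∀ r, r < K + 1 → (dp'.getD r []).length = N + 1) ∧
        (∀ r, r ≤ t → ∀ s, s ≤ N → pvG dp' r s = pvR r s) ∧
        (∀ r, t < r → ∀ s, pvG dp' r s = 0)) := by
  intro t
  induction t with
  | zero =>
      intro _
      have houter : PySem.List.pyRange 1 (((0:Nat):Int) + 1) 1 = [] := by
        rw [show ((0:Nat):Int) + 1 = 1 by norm_num]
        exact PySem.List.pyRange_one_eq_nil (by omega)
      rw [houter]
      simp only [List.foldl_nil]
      exact ⟨hlen, hrow, fun r hr s hs => by rw [show r = 0 by omega]; exact h0 s hs,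
        fun r hr s => hz r (by omega) s⟩
  | succ t ih =>
      intro ht
      obtain ⟨l1, l2, l3, l4⟩ := ih (by omega)
      have houter : PySem.List.pyRange 1 (((t+1:Nat):Int) + 1) 1
          = PySem.List.pyRange 1 ((t:Int) + 1) 1 ++ [(t:Int) + 1] := by
        rw [show ((t+1:Nat):Int) + 1 = ((t:Int)+1) + 1 by push_cast; ring]
        exact PySem.List.pyRange_one_succ_right (by omega)
      rw [houter, List.foldl_append, List.foldl_cons, List.foldl_nil]
      set dp' := (PySem.List.pyRange 1 ((t : Int) + 1) 1).foldl (fun dp i =>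
          (PySem.List.pyRange 1 ((N : Int) + 1) 1).foldl
            (fun dp j => pvSet2 dp i j (pvGet2 dp i (j - 1) + pvGet2 dp (i - 1) j)) dp) dp with hdp'
      rw [show ((t : Int) + 1) = ((t + 1 : Nat) : Int) by push_cast; ring]
      obtain ⟨m1, m2, m3, m4, m5⟩ := inner_fold K N (t + 1) (by omega) (by omega) dp' l1 l2
        (by intro s hs; rw [show t + 1 - 1 = t by omega]; exact l3 t (by omega) s hs)
        (fun s => l4 (t + 1) (by omega) s) N (le_refl N)
      refine ⟨m1, m2, ?_, ?_⟩
      · intro r hr s hs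
        by_cases h : r = t + 1
        · subst h; exact m4 s hs
        · rw [m3 r h s]; exact l3 r (by omega) s hs
      · intro r hr s
        rw [m3 r (by omega) s]; exact l4 r (by omega) s

lemma phase1_fold (K N : Nat) (dp : List (List Int))
    (hlen : dp.length = K + 1) (hrow : ∀ r, r < K + 1 → (dp.getD r []).length = N + 1)
    (hz : ∀ r s, pvG dp r s = 0) :
    ∀ m, m ≤ N →
      ((PySem.List.pyRange 1 ((m : Int) + 1) 1).foldl (fun dp i => pvSet2 dp 0 i i) dp
        |> fun dp' =>
        dp'.length = K + 1 ∧ (∀ r, r < K + 1 → (dp'.getD r []).length = N + 1) ∧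
        (∀ s, s ≤ m → pvG dp' 0 s = pvR 0 s) ∧
        (∀ r, 1 ≤ r → ∀ s, pvG dp' r s = 0)) := by
  intro m
  induction m with
  | zero =>
      intro _
      rw [show ((0:Nat):Int) + 1 = 1 by norm_num, PySem.List.pyRange_one_eq_nil (by omega)]
      simp only [List.foldl_nil]
      refine ⟨hlen, hrow, ?_, fun r _ s => hz r s⟩
      intro s hs
      interval_cases s
      rw [pvR_zero_col]; exact hz 0 0
  | succ m ih =>
      intro hm
      obtain ⟨l1, l2, l3, l4⟩ := ih (by omega)
      rw [show ((m+1:Nat):Int) + 1 = ((m:Int)+1) + 1 by push_cast; ring,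
        PySem.List.pyRange_one_succ_right (by omega),
        List.foldl_append, List.foldl_cons, List.foldl_nil]
      set dp' := (PySem.List.pyRange 1 ((m : Int) + 1) 1).foldl (fun dp i => pvSet2 dp 0 i i) dp with hdp'
      rw [show ((m : Int) + 1) = ((m + 1 : Nat) : Int) by push_cast; ring,
        show ((0:Int)) = ((0:Nat):Int) by norm_num, pvSet2_natCast]
      refine ⟨by simpa using l1, ?_, ?_, ?_⟩
      · intro r hr
        by_cases h : r = 0
        · subst h; rw [row_set2_self]; simpa using l2 0 (by omega)
        · rw [row_set2_ne _ _ _ _ _ h]; exact l2 r hr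
      · intro s hs
        by_cases h : s = m + 1
        · subst h
          rw [pvG_set2_self _ _ _ _ (by rw [l2 0 (by omega)]; omega)]
          simp [pvR, Nat.choose_one_right]
        · rw [pvG_set2_ne_col _ _ _ _ _ h]; exact l3 s (by omega)
      · intro r hr s
        rw [pvG_set2_ne_row _ _ _ _ _ _ (by omega)]; exact l4 r hr s

lemma dp0_eq (K N : Nat) :
    (PySem.List.pyRange 0 ((K : Int) + 1) 1).map (fun _ => List.replicate (((N : Int) + 1)).toNat 0)
      = List.replicate (K + 1) (List.replicate (N + 1) (0 : Int)) := by
  rw [show ((K : Int) + 1) = ((K + 1 : Nat) : Int) by push_cast; ring,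
    show (((N : Int) + 1)).toNat = N + 1 by omega, PySem.List.pyRange_zero_natCast]
  rw [List.map_map, List.eq_replicate_iff]
  simp

lemma dp0_len (K N : Nat) :
    (List.replicate (K + 1) (List.replicate (N + 1) (0 : Int))).length = K + 1 := by simp

lemma dp0_row (K N : Nat) : ∀ r, r < K + 1 →
    ((List.replicate (K + 1) (List.replicate (N + 1) (0 : Int))).getD r []).length = N + 1 := by
  intro r hr
  rw [List.getD_eq_getElem?_getD, List.getElem?_replicate, if_pos hr]
  simp

lemma dp0_zero (K N : Nat) : ∀ r s, pvG (List.replicate (K + 1) (List.replicate (N + 1) (0 : Int))) r s = 0 := by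
  intro r s
  unfold pvG
  simp only [List.getD_eq_getElem?_getD, List.getElem?_replicate]
  split_ifs <;> simp [List.getElem?_replicate]
  split_ifs <;> simp

lemma pvR_step (t N : Nat) :
    PySem.Int.floordiv (pvR t N * ((N : Int) - 1 + ((t : Int) + 2))) ((t : Int) + 2) = pvR (t + 1) N := by
  have h : pvR t N * ((N : Int) - 1 + ((t : Int) + 2)) = ((Nat.choose (t + N) (t + 1) * (t + N + 1) : Nat) : Int) := by
    unfold pvR; push_cast; ring
  have hmain : Nat.choose (t + N) (t + 1) * (t + N + 1) = Nat.choose (t + 1 + N) (t + 2) * (t + 2) := by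
    have h2 := Nat.add_one_mul_choose_eq (t + N) (t + 1)
    have h3 : t + N + 1 = t + 1 + N := by omega
    calc Nat.choose (t + N) (t + 1) * (t + N + 1)
        = (t + N + 1) * Nat.choose (t + N) (t + 1) := by ring
      _ = Nat.choose (t + 1 + N) (t + 2) * (t + 2) := by rw [h2]; rw [h3]
  rw [h, hmain, show ((t : Int) + 2) = ((t + 2 : Nat) : Int) by push_cast; ring,
    PySem.Int.floordiv_natCast, Nat.mul_div_cancel _ (by omega)]
  unfold pvR
  norm_cast

lemma alt_eq (K N : Nat) :
    (PySem.List.pyRange 1 ((K : Int) + 2) 1).foldl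
      (fun num i => PySem.Int.floordiv (num * ((N : Int) - 1 + i)) i) 1 = pvR K N := by
  induction K with
  | zero =>
      rw [show ((0:Nat):Int) + 2 = 1 + 1 by norm_num, PySem.List.pyRange_one_singleton]
      simp [pvR, PySem.Int.floordiv]
  | succ t ih =>
      rw [show ((t+1:Nat):Int) + 2 = ((t:Int)+2) + 1 by push_cast; ring,
        PySem.List.pyRange_one_succ_right (by omega)]
      rw [List.foldl_append, List.foldl_cons, List.foldl_nil, ih]
      exact pvR_step t N

lemma alt_eq' (K N : Nat) : president_alt (K : Int) (N : Int) = pvR K N := by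
  unfold president_alt; exact alt_eq K N

lemma a_eq (K N : Nat) : president (K : Int) (N : Int) = pvR K N := by
  unfold president
  rw [dp0_eq K N]
  obtain ⟨p1, p2, p3, p4⟩ := phase1_fold K N _ (dp0_len K N) (dp0_row K N) (dp0_zero K N) N (le_refl N)
  set dp1 := (PySem.List.pyRange 1 ((N : Int) + 1) 1).foldl (fun dp i => pvSet2 dp 0 i i)
    (List.replicate (K + 1) (List.replicate (N + 1) (0 : Int))) with hdp1
  obtain ⟨q1, q2, q3, q4⟩ := outer_fold K N dp1 p1 p2
    (by intro s hs; exact p3 s hs) p4 K (le_refl K)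
  rw [pvGet2_natCast]
  exact q3 K (le_refl K) N (le_refl N)

-- ===== VERDICT (by name: the statement is the Claim_ definition above) =====
theorem president_spec : Claim_equal_president := by
  intro k n _ hpre
  obtain ⟨hk, hn⟩ := hpre
  obtain ⟨K, rfl⟩ : ∃ K : Nat, k = (K : Int) := ⟨k.toNat, (Int.toNat_of_nonneg hk).symm⟩
  obtain ⟨N, rfl⟩ : ∃ N : Nat, n = (N : Int) := ⟨n.toNat, (Int.toNat_of_nonneg hn).symm⟩
  unfold Spec_president
  rw [a_eq, alt_eq']
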